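-- pv_equiv track=rewrite | github.com/Alexandr-Hohlov/AOC-2023 | P2/p2.py | calcMax
-- ===== SOURCE A (Python) =====
-- def calcMax(game):
--     redMax = 0
--     greenMax = 0
--     blueMax = 0
--     for x in game[1:]:
--         if x[0] > redMax:
--             redMax = x[0]
--         if x[1] > greenMax:
--             greenMax= x[1]
--         if x[2] > blueMax:
--             blueMax = x[2]
--     return redMax * greenMax * blueMax
-- ===== SOURCE B (Python) =====
-- def calcMax(game):
--     prod = 1
--     for i in range(3):
--         prod *= sorted([0] + [x[i] for x in game[1:]], reverse=True)[0]
--     return prod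
-- ===== Notes on version B (the rewrite author's own statement) =====
-- stated objective: alternative
-- what changed: Replaces the fused running-max loop by a sort-based selection: for each of the three colors it builds the column (seeded with 0), sorts it descending and takes the first element, multiplying the three results.
import Mathlib
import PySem

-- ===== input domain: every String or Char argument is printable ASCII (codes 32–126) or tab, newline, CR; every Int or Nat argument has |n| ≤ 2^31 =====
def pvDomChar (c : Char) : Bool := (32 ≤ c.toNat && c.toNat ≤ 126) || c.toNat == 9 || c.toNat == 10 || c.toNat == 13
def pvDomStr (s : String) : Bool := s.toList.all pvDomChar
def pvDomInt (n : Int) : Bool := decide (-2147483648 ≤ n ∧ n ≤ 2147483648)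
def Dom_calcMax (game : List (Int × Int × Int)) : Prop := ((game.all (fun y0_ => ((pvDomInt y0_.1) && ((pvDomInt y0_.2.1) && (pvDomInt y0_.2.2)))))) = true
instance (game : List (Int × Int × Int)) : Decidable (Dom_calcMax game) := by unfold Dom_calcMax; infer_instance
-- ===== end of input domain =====

-- B replaces A's single fused running-max loop by a sort-based selection per color:
-- each column (seeded with 0) is sorted descending and its first element taken,
-- the three picks multiplied (objective: alternative).

-- ===== PORT A =====
def calcMax (game : List (Int × Int × Int)) : Int :=
  let s := (PySem.List.slice game (some 1) none).foldl
    (fun (acc : Int × Int × Int) x =>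
      let r := if x.1 > acc.1 then x.1 else acc.1
      let g := if x.2.1 > acc.2.1 then x.2.1 else acc.2.1
      let b := if x.2.2 > acc.2.2 then x.2.2 else acc.2.2
      (r, g, b)) (0, 0, 0)
  s.1 * s.2.1 * s.2.2

-- ===== PORT B =====
-- x[i] on the 3-tuple, for i drawn from range(3)
def pvProj (i : Int) (x : Int × Int × Int) : Int :=
  if i = 0 then x.1 else if i = 1 then x.2.1 else x.2.2

def calcMax_alt (game : List (Int × Int × Int)) : Int :=
  (PySem.List.pyRange 0 3 1).foldl
    (fun prod i =>
      prod * (PySem.List.sorted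
        (0 :: (PySem.List.slice game (some 1) none).map (pvProj i))
        (fun y => y) true).headD 0) 1

-- ===== PRECONDITION & SPEC =====
def Spec_calcMax (game : List (Int × Int × Int)) (out : Int) : Prop := out = calcMax_alt game
instance (game : List (Int × Int × Int)) (out : Int) : Decidable (Spec_calcMax game out) := by unfold Spec_calcMax; infer_instance

-- ===== CLAIM (what is proved, stated in full; the proofs are below) =====
def Claim_equal_calcMax : Prop := ∀ (game : List (Int × Int × Int)), Dom_calcMax game → Spec_calcMax game (calcMax game)

-- ===== LEMMAS AND PROOFS =====

-- ===== VERDICT (by name: the statement is the Claim_ definition above) =====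
-- A's fused loop computes the three column running maxima componentwise.
theorem calcMax_fused_split (l : List (Int × Int × Int)) (r g b : Int) :
    l.foldl (fun (acc : Int × Int × Int) x =>
      (if x.1 > acc.1 then x.1 else acc.1,
       if x.2.1 > acc.2.1 then x.2.1 else acc.2.1,
       if x.2.2 > acc.2.2 then x.2.2 else acc.2.2)) (r, g, b)
    = ((l.map (fun x => x.1)).foldl max r,
       (l.map (fun x => x.2.1)).foldl max g,
       (l.map (fun x => x.2.2)).foldl max b) := by
  induction l generalizing r g b with
  | nil => rfl
  | cons x l ih =>
      simp only [List.foldl_cons, List.map_cons, ih]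
      congr 1 <;> [skip; congr 1] <;> congr 1 <;> omega

-- the head of the descending sort of 0 :: l is the running max of l from 0
theorem head_sorted_rev_eq_foldl_max (l : List Int) :
    (PySem.List.sorted (0 :: l) (fun y => y) true).headD 0 = l.foldl max 0 := by
  obtain ⟨m, t, hs⟩ : ∃ m t, PySem.List.sorted (0 :: l) (fun y => y) true = m :: t := by
    cases hE : PySem.List.sorted (0 :: l) (fun y => y) true with
    | nil => exact absurd ((PySem.List.sorted_eq_nil_iff ..).mp hE) (by simp)
    | cons m t => exact ⟨m, t, rfl⟩
  have hge := PySem.List.key_head_sorted_rev_ge _ _ hs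
  have hmem : m ∈ 0 :: l := (PySem.List.mem_sorted _ _ _ _).mp (hs ▸ List.mem_cons_self ..)
  have hfold := PySem.List.le_foldl_max l 0
  have hfmem := PySem.List.foldl_max_mem l (0 : Int)
  rw [hs]
  simp only [List.headD_cons]
  have h1 : l.foldl max 0 ≤ m := by
    rcases hfmem with h | h
    · rw [h]; exact hge 0 (List.mem_cons_self ..)
    · exact hge _ (List.mem_cons_of_mem _ h)
  have h2 : m ≤ l.foldl max 0 := by
    rcases List.mem_cons.mp hmem with h | h
    · rw [h]; exact hfold.1
    · exact hfold.2 m h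
  omega

-- ===== VERDICT (by name: the statement is the Claim_ definition above) =====
theorem calcMax_spec : Claim_equal_calcMax := by
  intro game _
  unfold Spec_calcMax calcMax calcMax_alt
  rw [calcMax_fused_split]
  rw [show PySem.List.pyRange 0 3 1 = [0, 1, 2] from rfl]
  simp only [List.foldl, head_sorted_rev_eq_foldl_max]
  have p0 : pvProj 0 = fun x => x.1 := by funext x; norm_num [pvProj]
  have p1 : pvProj 1 = fun x => x.2.1 := by funext x; norm_num [pvProj]
  have p2 : pvProj 2 = fun x => x.2.2 := by funext x; norm_num [pvProj]
  rw [p0, p1, p2]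
  ring
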